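-- pv_equiv track=rewrite | github.com/the-pawel-wojcik/ezFCF | bin/gradient_parser.py | find_program_name
-- ===== SOURCE A (Python) =====
-- def find_program_name(lines: list[str]) -> str | None:
--     for line in lines[:10]:
--         if line.strip() == "Welcome to Q-Chem":
--             return "qchem"
--
--     for line in lines[:10]:
--         if line.strip() == "--invoking executable--":
--             return "cfour"
--
--     return None
-- ===== SOURCE B (Python) =====
-- def find_program_name(lines: list[str]) -> str | None:
--     # Single pass over the first ten lines: return "qchem" immediately on its
--     # banner (highest priority); remember a cfour sighting and report it only
--     # after the whole window has been scanned without a Q-Chem banner.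
--     pending = None
--     for line in lines[:10]:
--         stripped = line.strip()
--         if stripped == "Welcome to Q-Chem":
--             return "qchem"
--         if stripped == "--invoking executable--":
--             pending = "cfour"
--     return pending
-- ===== Notes on version B (the rewrite author's own statement) =====
-- stated objective: alternative
-- what changed: Replaces A's two staged scans of the first-ten lines by a single pass with an accumulator: early-return on the Q-Chem banner, remember a cfour marker and report it only after the window is exhausted, preserving qchem-over-cfour priority.
import Mathlib
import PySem

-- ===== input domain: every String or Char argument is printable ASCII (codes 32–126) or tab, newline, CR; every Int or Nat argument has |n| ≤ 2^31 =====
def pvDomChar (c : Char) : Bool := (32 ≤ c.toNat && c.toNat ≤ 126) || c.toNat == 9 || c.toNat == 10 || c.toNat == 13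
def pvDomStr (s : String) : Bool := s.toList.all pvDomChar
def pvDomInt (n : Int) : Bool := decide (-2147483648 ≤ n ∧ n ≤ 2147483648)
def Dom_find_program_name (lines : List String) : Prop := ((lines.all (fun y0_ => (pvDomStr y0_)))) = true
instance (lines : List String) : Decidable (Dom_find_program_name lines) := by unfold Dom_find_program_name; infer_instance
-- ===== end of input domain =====

-- B replaces A's two staged scans by a single pass with an accumulator (early exit on qchem, remember cfour); objective: alternative.

-- ===== PORT A =====
-- 'for line in lines[:10]: if line.strip() == "Welcome to Q-Chem": return "qchem"'
def fpnLoopQ : List String → Option String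
  | [] => none
  | l :: ls => if PySem.Str.strip l = "Welcome to Q-Chem" then some "qchem" else fpnLoopQ ls

-- 'for line in lines[:10]: if line.strip() == "--invoking executable--": return "cfour"'
def fpnLoopC : List String → Option String
  | [] => none
  | l :: ls => if PySem.Str.strip l = "--invoking executable--" then some "cfour" else fpnLoopC ls

def find_program_name (lines : List String) : Option String :=
  match fpnLoopQ (PySem.List.slice lines none (some 10)) with
  | some r => some r
  | none =>
    match fpnLoopC (PySem.List.slice lines none (some 10)) with
    | some r => some r
    | none => none

-- ===== PORT B =====
-- single pass with accumulator 'pending': early return on the Q-Chem banner,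
-- remember the cfour marker, report it after the window is exhausted
def fpnScan : List String → Option String → Option String
  | [], pending => pending
  | l :: ls, pending =>
    let stripped := PySem.Str.strip l
    if stripped = "Welcome to Q-Chem" then some "qchem"
    else if stripped = "--invoking executable--" then fpnScan ls (some "cfour")
    else fpnScan ls pending

def find_program_name_alt (lines : List String) : Option String :=
  fpnScan (PySem.List.slice lines none (some 10)) none

-- ===== PRECONDITION & SPEC =====
def Spec_find_program_name (lines : List String) (out : Option String) : Prop := out = find_program_name_alt lines
instance (lines : List String) (out : Option String) : Decidable (Spec_find_program_name lines out) := by unfold Spec_find_program_name; infer_instance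

-- ===== CLAIM (what is proved, stated in full; the proofs are below) =====
def Claim_equal_find_program_name : Prop := ∀ (lines : List String), Dom_find_program_name lines → Spec_find_program_name lines (find_program_name lines)

-- ===== LEMMAS AND PROOFS =====

theorem fpnLoopC_cfour (xs : List String) (r : String) (h : fpnLoopC xs = some r) : r = "cfour" := by
  induction xs with
  | nil => simp [fpnLoopC] at h
  | cons l ls ih =>
    by_cases hc : PySem.Str.strip l = "--invoking executable--"
    · simp [fpnLoopC, hc] at h; exact h.symm
    · simp [fpnLoopC, hc] at h; exact ih h

-- the single pass equals: qchem result if present, else the cfour result (seeded by the accumulator)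
theorem fpnScan_eq (xs : List String) (pending : Option String) :
    fpnScan xs pending =
      match fpnLoopQ xs with
      | some r => some r
      | none =>
        match fpnLoopC xs with
        | some r => some r
        | none => pending := by
  induction xs generalizing pending with
  | nil => simp [fpnScan, fpnLoopQ, fpnLoopC]
  | cons l ls ih =>
    by_cases hq : PySem.Str.strip l = "Welcome to Q-Chem"
    · simp [fpnScan, fpnLoopQ, hq]
    · by_cases hc : PySem.Str.strip l = "--invoking executable--"
      · simp [fpnScan, fpnLoopQ, fpnLoopC, hc, ih]
        cases fpnLoopQ ls <;> simp
        cases hC : fpnLoopC ls <;> simp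
        exact fpnLoopC_cfour ls _ hC
      · simp [fpnScan, fpnLoopQ, fpnLoopC, hq, hc, ih]

theorem find_program_name_spec : Claim_equal_find_program_name := by
  intro lines _
  unfold Spec_find_program_name find_program_name find_program_name_alt
  rw [fpnScan_eq]
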